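-- pv_equiv track=rewrite | github.com/SangjinH/algorithm | programmers/wootech/4.py | solution
-- ===== SOURCE A (Python) =====
-- from collections import deque
--
-- def solution(s):
--
--     s = deque(s)
--     cnt = 0
--
--     while 1:
--         if cnt == len(s):
--             break
--
--         if s[0] == s[-1]:
--             s.append(s.popleft())
--             cnt += 1
--
--         else:
--             break
--
--     answer = []
--
--     standard = s.popleft()
--     cnt = 1
--     while s:
--         now = s.popleft()
--         if now == standard:
--             cnt += 1
--         else:
--             answer.append(cnt)
--             cnt = 1
--             standard = now
--
--     answer.append(cnt)
--
--     return sorted(answer)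
-- ===== SOURCE B (Python) =====
-- def solution(s):
--     # B: no rotation; one linear pass collecting run lengths, then merge the
--     # wrap-around run when the string is circular at its endpoints.
--     wrap = s[0] == s[-1]          # IndexError on empty input, as in A
--     counts = []
--     prev = None
--     for ch in s:
--         if counts and ch == prev:
--             counts[-1] += 1
--         else:
--             counts.append(1)
--             prev = ch
--     if wrap and len(counts) >= 2:
--         counts[0] += counts.pop()
--     return sorted(counts)
-- ===== Notes on version B (the rewrite author's own statement) =====
-- stated objective: simpler
-- what changed: B drops A's deque-rotation loop entirely: it collects linear run lengths in one pass and merges the first and last runs when the string's endpoints match, instead of rotating the string to a run boundary before counting.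
import Mathlib
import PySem

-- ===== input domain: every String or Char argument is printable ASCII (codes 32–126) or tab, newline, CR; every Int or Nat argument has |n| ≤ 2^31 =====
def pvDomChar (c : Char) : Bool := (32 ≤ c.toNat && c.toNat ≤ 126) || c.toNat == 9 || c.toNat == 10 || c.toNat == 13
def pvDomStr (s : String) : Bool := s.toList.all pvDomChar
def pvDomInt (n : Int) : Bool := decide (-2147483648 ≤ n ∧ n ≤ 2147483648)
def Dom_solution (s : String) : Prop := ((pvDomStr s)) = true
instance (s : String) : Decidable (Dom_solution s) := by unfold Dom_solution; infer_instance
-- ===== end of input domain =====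

-- B changes the algorithm (one linear run-length pass plus a wrap-around merge instead of
-- A's deque rotation loop); equal return value on every nonempty string, both raise on "".

-- ===== PORT A =====
-- A's first while-loop: rotate front to back while s[0] == s[-1], at most len(s) times (cnt).
def rotA (l : List Char) (cnt : Nat) : List Char :=
  match l with
  | [] => []   -- cnt == len(s) == 0: the loop breaks at once
  | h :: t =>
    if (h :: t).length ≤ cnt then h :: t
    else if (h :: t).getLast? == some h then rotA (t ++ [h]) (cnt + 1) else h :: t
termination_by l.length - cnt
decreasing_by simp_all; omega

-- A's second while-loop: run lengths of the rotated deque.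
def runsA : List Char → Char → Int → List Int → List Int
  | [], _, cnt, ans => ans ++ [cnt]
  | now :: rest, std, cnt, ans =>
    if now == std then runsA rest std (cnt + 1) ans
    else runsA rest now 1 (ans ++ [cnt])

def aCore (m : List Char) : List Int :=
  match m with
  | [] => []  -- unreachable under Pre_: Python's popleft raises IndexError on the empty string
  | h :: t => PySem.List.sorted (runsA t h 1 []) (fun x => x) false

def solution (s : String) : List Int := aCore (rotA s.toList 0)

-- ===== PORT B =====
-- counts[-1] += 1
def incLast : List Int → List Int
  | [] => []
  | [c] => [c + 1]
  | c :: r => c :: incLast r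

-- B's for-loop over the characters, carrying (counts, prev).
def bLoop : List Char → List Int → Option Char → List Int
  | [], counts, _ => counts
  | ch :: rest, counts, prev =>
    if !counts.isEmpty && prev == some ch then bLoop rest (incLast counts) prev
    else bLoop rest (counts ++ [1]) (some ch)

def altCore (l : List Char) : List Int :=
  match l with
  | [] => []  -- unreachable under Pre_: s[0] raises IndexError on the empty string
  | h :: t =>
    let wrap := (h :: t).getLast? == some h   -- s[0] == s[-1]
    let counts := bLoop (h :: t) [] none
    let counts :=
      if wrap && decide (2 ≤ counts.length) then
        match PySem.List.pop? counts (-1) with   -- counts.pop()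
        | some (v, rest) =>
          match rest with
          | c :: r => (c + v) :: r               -- counts[0] += popped
          | [] => []
        | none => counts
      else counts
    PySem.List.sorted counts (fun x => x) false

def solution_alt (s : String) : List Int := altCore s.toList

-- ===== PRECONDITION & SPEC =====
-- Pre_ excludes only the empty string, on which A raises IndexError (deque.popleft from empty).
def Pre_solution (s : String) : Prop := s ≠ ""
instance (s : String) : Decidable (Pre_solution s) := by unfold Pre_solution; infer_instance
def pvWitness_solution : String := "aabba"

def Spec_solution (s : String) (out : List Int) : Prop := out = solution_alt s
instance (s : String) (out : List Int) : Decidable (Spec_solution s out) := by unfold Spec_solution; infer_instance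

-- ===== CLAIM (what is proved, stated in full; the proofs are below) =====
def Claim_equal_solution : Prop := ∀ (s : String), Dom_solution s → Pre_solution s → Spec_solution s (solution s)

-- ===== LEMMAS AND PROOFS =====

-- canonical linear run lengths (proof-side)
def addFirst (k : Int) : List Int → List Int
  | [] => []
  | c :: r => (c + k) :: r

def linRuns : List Char → List Int
  | [] => []
  | [_] => [1]
  | x :: y :: t => if x == y then addFirst 1 (linRuns (y :: t)) else 1 :: linRuns (y :: t)

theorem addFirst_zero (l : List Int) : addFirst 0 l = l := by
  cases l <;> simp [addFirst]

theorem linRuns_ne_nil (l : List Char) (h : l ≠ []) : linRuns l ≠ [] := by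
  induction l using linRuns.induct with
  | case1 => exact absurd rfl h
  | case2 x => simp [linRuns]
  | case3 x y t hxy ih =>
    have hne := ih (List.cons_ne_nil _ _)
    simp only [linRuns, if_pos hxy]
    cases hc : linRuns (y :: t) with
    | nil => exact absurd hc hne
    | cons a r => simp [addFirst]
  | case4 x y t hxy ih =>
    simp only [linRuns]
    rw [if_neg hxy]
    simp

theorem runsA_eq (t : List Char) (h : Char) (c : Int) (ans : List Int) :
    runsA t h c ans = ans ++ addFirst (c - 1) (linRuns (h :: t)) := by
  induction t generalizing h c ans with
  | nil => simp [runsA, linRuns, addFirst]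
  | cons y t ih =>
    by_cases hyh : y = h
    · subst hyh
      rw [runsA, if_pos (by simp)]
      rw [ih]
      simp only [linRuns, beq_self_eq_true, if_pos]
      cases hc : linRuns (y :: t) with
      | nil => exact absurd hc (linRuns_ne_nil _ (List.cons_ne_nil _ _))
      | cons a r => simp [addFirst]
    · rw [runsA, if_neg (by simpa using fun e => hyh e)]
      rw [ih]
      have : linRuns (h :: y :: t) = 1 :: linRuns (y :: t) := by
        simp only [linRuns]
        rw [if_neg (by simpa using fun e : h = y => hyh e.symm)]
      rw [this]
      cases hc : linRuns (y :: t) with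
      | nil => exact absurd hc (linRuns_ne_nil _ (List.cons_ne_nil _ _))
      | cons a r => simp [addFirst]

theorem incLast_snoc (acc : List Int) (c : Int) : incLast (acc ++ [c]) = acc ++ [c + 1] := by
  induction acc with
  | nil => rfl
  | cons a acc ih =>
    cases acc with
    | nil => rfl
    | cons b acc => simpa [incLast] using ih

theorem bLoop_eq_runsA (rest : List Char) (prev : Char) (cnt : Int) (acc : List Int) :
    bLoop rest (acc ++ [cnt]) (some prev) = runsA rest prev cnt acc := by
  induction rest generalizing prev cnt acc with
  | nil => rfl
  | cons ch rest ih =>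
    by_cases hc : ch = prev
    · subst hc
      rw [bLoop, if_pos (by simp), incLast_snoc, ih]
      rw [runsA, if_pos (by simp)]
    · rw [bLoop, if_neg (by simp; exact fun e : prev = ch => hc e.symm)]
      rw [ih]
      rw [runsA, if_neg (by simpa using hc)]

theorem bLoop_linRuns (h : Char) (t : List Char) :
    bLoop (h :: t) [] none = linRuns (h :: t) := by
  rw [bLoop, if_neg (by simp)]
  have := bLoop_eq_runsA t h 1 []
  simp only [List.nil_append] at this ⊢
  rw [this, runsA_eq]
  simp [addFirst_zero]

theorem linRuns_const (t : List Char) (c : Char) (hall : ∀ x ∈ t, x = c) :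
    linRuns (c :: t) = [((t.length : Int) + 1)] := by
  induction t with
  | nil => rfl
  | cons y t ih =>
    have hy : y = c := hall y (by simp)
    subst hy
    have : linRuns (y :: t) = [((t.length : Int) + 1)] :=
      ih (fun x hx => hall x (by simp [hx]))
    simp only [linRuns, beq_self_eq_true, if_pos, this, addFirst]
    simp

theorem incLast_cons (a : Int) (r : List Int) (h : r ≠ []) : incLast (a :: r) = a :: incLast r := by
  cases r with
  | nil => exact absurd rfl h
  | cons b r => rfl

theorem addFirst_incLast (k : Int) (l : List Int) (h : l ≠ []) :
    addFirst k (incLast l) = incLast (addFirst k l) := by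
  cases l with
  | nil => exact absurd rfl h
  | cons a r =>
    cases r with
    | nil => simp [incLast, addFirst]; ring
    | cons b r => simp [incLast, addFirst]

theorem linRuns_snoc_last (u : List Char) (c : Char) (hu : u ≠ []) (hl : u.getLast? = some c) :
    linRuns (u ++ [c]) = incLast (linRuns u) := by
  induction u using linRuns.induct with
  | case1 => exact absurd rfl hu
  | case2 x =>
    have : c = x := by simpa using hl.symm
    subst this
    simp [linRuns, incLast, addFirst]
  | case3 x y t hxy ih =>
    have hx : x = y := by simpa using hxy
    subst hx
    have hl' : (x :: t).getLast? = some c := by simpa using hl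
    have h2 := ih (List.cons_ne_nil _ _) hl'
    have hne := linRuns_ne_nil (x :: t) (List.cons_ne_nil _ _)
    calc linRuns ((x :: x :: t) ++ [c])
        = addFirst 1 (linRuns ((x :: t) ++ [c])) := by
          simp only [List.cons_append, linRuns]
          rw [if_pos (by simp)]
      _ = addFirst 1 (incLast (linRuns (x :: t))) := by rw [h2]
      _ = incLast (addFirst 1 (linRuns (x :: t))) := addFirst_incLast _ _ hne
      _ = incLast (linRuns (x :: x :: t)) := by
          simp only [linRuns]
          rw [if_pos (by simp)]
  | case4 x y t hxy ih =>
    have hl' : (y :: t).getLast? = some c := by simpa using hl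
    have h2 := ih (List.cons_ne_nil _ _) hl'
    have hne := linRuns_ne_nil (y :: t) (List.cons_ne_nil _ _)
    have hxy' : ¬ x = y := by simpa using hxy
    calc linRuns ((x :: y :: t) ++ [c]) = 1 :: linRuns ((y :: t) ++ [c]) := by
          simp only [List.cons_append, linRuns]
          rw [if_neg hxy]
      _ = 1 :: incLast (linRuns (y :: t)) := by rw [h2]
      _ = incLast (1 :: linRuns (y :: t)) := (incLast_cons _ _ hne).symm
      _ = incLast (linRuns (x :: y :: t)) := by
          simp only [linRuns]
          rw [if_neg hxy]

theorem lead_decomp (h : Char) (t : List Char) :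
    ∃ (a : Nat) (t' : List Char), h :: t = List.replicate (a + 1) h ++ t' ∧ t'.head? ≠ some h := by
  induction t generalizing h with
  | nil => exact ⟨0, [], by simp⟩
  | cons y t2 ih =>
    by_cases hy : y = h
    · subst hy
      obtain ⟨a, t', heq, hhd⟩ := ih y
      exact ⟨a + 1, t', by simp only [List.replicate_succ, List.cons_append] at heq ⊢; rw [← heq], hhd⟩
    · exact ⟨0, y :: t2, by simp, by simpa using hy⟩

theorem linRuns_replicate_append (a : Nat) (h : Char) (t' : List Char) (hh : t'.head? ≠ some h) :
    linRuns (List.replicate (a + 1) h ++ t') = ((a : Int) + 1) :: linRuns t' := by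
  induction a with
  | zero =>
    cases t' with
    | nil => simp [linRuns]
    | cons y t2 =>
      have hy : ¬ h = y := by simp at hh; exact fun e => hh e.symm
      rw [show List.replicate (0 + 1) h ++ (y :: t2) = h :: y :: t2 from by simp]
      simp only [linRuns]
      rw [if_neg (by simpa using hy)]
      norm_num
  | succ a ih =>
    have hrep : List.replicate (a + 1 + 1) h ++ t' = h :: (List.replicate (a + 1) h ++ t') := by
      simp [List.replicate_succ]
    rw [hrep]
    have hcons : List.replicate (a + 1) h ++ t' = h :: (List.replicate a h ++ t') := by
      simp [List.replicate_succ]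
    rw [hcons]
    show linRuns (h :: h :: (List.replicate a h ++ t')) = _
    simp only [linRuns, beq_self_eq_true, if_pos]
    rw [← hcons, ih]
    simp [addFirst]

theorem altCore_eval_nowrap (h : Char) (t : List Char) (hw : (h :: t).getLast? ≠ some h) :
    altCore (h :: t) = PySem.List.sorted (linRuns (h :: t)) (fun x => x) false := by
  have hb : ((h :: t).getLast? == some h) = false := by simpa using hw
  simp only [altCore, bLoop_linRuns, hb, Bool.false_and, Bool.false_eq_true]
  simp

theorem altCore_eval_single (h : Char) (t : List Char) (n : Int)
    (hc : linRuns (h :: t) = [n]) :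
    altCore (h :: t) = PySem.List.sorted [n] (fun x => x) false := by
  simp [altCore, bLoop_linRuns, hc]

theorem altCore_eval_wrap (h : Char) (t : List Char) (c b : Int) (R : List Int)
    (hw : (h :: t).getLast? = some h) (hc : linRuns (h :: t) = c :: (R ++ [b])) :
    altCore (h :: t) = PySem.List.sorted ((c + b) :: R) (fun x => x) false := by
  have hb : ((h :: t).getLast? == some h) = true := by simp [hw]
  have hpop : PySem.List.pop? (c :: (R ++ [b])) (-1) = some (b, c :: R) := by
    rw [show c :: (R ++ [b]) = (c :: R) ++ [b] from by simp]
    exact PySem.List.pop?_last _ _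
  simp only [altCore, bLoop_linRuns, hc, hb, Bool.true_and]
  rw [if_pos (by simp)]
  rw [hpop]

-- one rotation step preserves B's value
theorem altCore_rot_step (h : Char) (t : List Char) (hl : (h :: t).getLast? = some h) :
    altCore (t ++ [h]) = altCore (h :: t) := by
  cases t with
  | nil => rfl
  | cons y0 t0 =>
  obtain ⟨a, t', heq, hhd⟩ := lead_decomp h (y0 :: t0)
  cases ht' : t' with
  | nil =>
    -- the whole string is one run of h: rotation maps it to itself
    subst ht'
    rw [List.append_nil] at heq
    have htail0 : y0 :: t0 = List.replicate a h := by
      have h2 : h :: (y0 :: t0) = h :: List.replicate a h := by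
        rw [heq, List.replicate_succ]
      injection h2
    have : (y0 :: t0) ++ [h] = h :: (y0 :: t0) := by
      rw [htail0, ← List.replicate_succ', ← List.replicate_succ]
    rw [this]
  | cons y t2 =>
    subst ht'
    have hyh : ¬ y = h := by simpa [eq_comm] using hhd
    have ht'ne : (y :: t2) ≠ [] := List.cons_ne_nil _ _
    have hlast' : (y :: t2).getLast? = some h := by
      rw [heq, List.getLast?_append_of_ne_nil _ ht'ne] at hl
      exact hl
    have hLR : linRuns (h :: y0 :: t0) = ((a : Int) + 1) :: linRuns (y :: t2) := by
      rw [heq]; exact linRuns_replicate_append a h _ (by simpa [eq_comm] using hhd)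
    obtain ⟨R, b, hRb⟩ : ∃ L b, linRuns (y :: t2) = L ++ [b] := by
      rcases List.eq_nil_or_concat (linRuns (y :: t2)) with h'|⟨L,b,h'⟩
      · exact absurd h' (linRuns_ne_nil _ ht'ne)
      · exact ⟨L, b, by simpa using h'⟩
    have hA : altCore (h :: y0 :: t0) = PySem.List.sorted (((a : Int) + 1 + b) :: R) (fun x => x) false :=
      altCore_eval_wrap _ _ _ _ _ hl (by rw [hLR, hRb])
    -- t = replicate a h ++ (y :: t2)
    have htail : y0 :: t0 = List.replicate a h ++ (y :: t2) := by
      have h2 : h :: (y0 :: t0) = h :: (List.replicate a h ++ (y :: t2)) := by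
        rw [heq, List.replicate_succ, List.cons_append]
      injection h2
    have hsnoc : linRuns ((y :: t2) ++ [h]) = R ++ [b + 1] := by
      rw [linRuns_snoc_last _ _ ht'ne hlast', hRb, incLast_snoc]
    have hrot : (y0 :: t0) ++ [h] = List.replicate a h ++ ((y :: t2) ++ [h]) := by
      rw [htail, List.append_assoc]
    cases a with
    | zero =>
      -- rotated string starts with y ≠ h: no wrap merge on the B side
      have hform : (y0 :: t0) ++ [h] = y :: (t2 ++ [h]) := by simpa using hrot
      have hwne : (y :: (t2 ++ [h])).getLast? ≠ some y := by
        have : (y :: (t2 ++ [h])).getLast? = some h := by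
          rw [← hform, List.getLast?_append_of_ne_nil _ (by simp : ([h] : List Char) ≠ [])]
          rfl
        rw [this]; simpa [eq_comm] using hyh
      rw [hform, altCore_eval_nowrap _ _ hwne]
      have : linRuns (y :: (t2 ++ [h])) = R ++ [b + 1] := by
        rw [show y :: (t2 ++ [h]) = (y :: t2) ++ [h] from by simp, hsnoc]
      rw [this, hA]
      refine PySem.List.sorted_eq_sorted_of_perm _ _ _ (fun x y e => e) ?_
      have : ((0 : Nat) : Int) + 1 + b = b + 1 := by push_cast; ring
      rw [this]
      exact List.perm_append_singleton _ _
    | succ a2 =>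
      -- rotated string still starts with h: wrap merge fires on both sides
      have hform : (y0 :: t0) ++ [h] = h :: (List.replicate a2 h ++ ((y :: t2) ++ [h])) := by
        rw [hrot, List.replicate_succ, List.cons_append]
      have hwl : (h :: (List.replicate a2 h ++ ((y :: t2) ++ [h]))).getLast? = some h := by
        rw [← hform, List.getLast?_append_of_ne_nil _ (by simp : ([h] : List Char) ≠ [])]
        rfl
      have hLR2 : linRuns (h :: (List.replicate a2 h ++ ((y :: t2) ++ [h])))
          = ((a2 : Int) + 1) :: (R ++ [b + 1]) := by
        rw [show h :: (List.replicate a2 h ++ ((y :: t2) ++ [h]))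
              = List.replicate (a2 + 1) h ++ ((y :: t2) ++ [h]) from by
            simp [List.replicate_succ]]
        rw [linRuns_replicate_append a2 h _ (by simpa [eq_comm] using hyh), hsnoc]
      rw [hform, altCore_eval_wrap _ _ _ _ _ hwl hLR2, hA]
      have : (a2 : Int) + 1 + (b + 1) = ((a2 + 1 : Nat) : Int) + 1 + b := by push_cast; ring
      rw [this]

theorem altCore_rotA (l : List Char) (cnt : Nat) : altCore (rotA l cnt) = altCore l := by
  induction l, cnt using rotA.induct with
  | case1 cnt => rw [rotA]
  | case2 cnt h t hle => rw [rotA, if_pos hle]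
  | case3 cnt h t hle hbeq ih =>
    rw [rotA, if_neg hle, if_pos hbeq, ih]
    exact altCore_rot_step h t (by simpa using hbeq)
  | case4 cnt h t hle hbeq => rw [rotA, if_neg hle, if_neg hbeq]

theorem rotA_shape (q p : List Char) (c : Char) (hp : ∀ x ∈ p, x = c)
    (hl : (q ++ p).getLast? = some c) :
    (∀ x ∈ rotA (q ++ p) p.length, x = c) ∨
      ((rotA (q ++ p) p.length).head? ≠ (rotA (q ++ p) p.length).getLast?) := by
  induction q generalizing p with
  | nil =>
    left
    cases p with
    | nil => intro x hx; rw [List.nil_append, rotA] at hx; simp at hx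
    | cons ph pt =>
      rw [List.nil_append, rotA, if_pos (le_refl _)]
      exact hp
  | cons aq q' ih =>
    rw [List.cons_append] at hl ⊢
    rw [rotA, if_neg (by simp)]
    by_cases hca : c = aq
    · rw [if_pos (by simp [hl, hca])]
      have e1 : (q' ++ p) ++ [aq] = q' ++ (p ++ [aq]) := by simp
      have e2 : p.length + 1 = (p ++ [aq]).length := by simp
      rw [e1, e2]
      apply ih
      · intro x hx
        rcases List.mem_append.mp hx with hx | hx
        · exact hp x hx
        · simp at hx; rw [hx, ← hca]
      · rw [List.getLast?_append_of_ne_nil _ (by simp : (p ++ [aq]) ≠ []), List.getLast?_concat, hca]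
    · rw [if_neg (by simp [hl]; exact fun e => hca e)]
      right
      rw [hl]
      simp
      exact fun e => hca e.symm

theorem aCore_eq_altCore_of_shape (m : List Char)
    (hm : (∀ x ∈ m, ∀ y ∈ m, x = y) ∨ m.head? ≠ m.getLast?) :
    aCore m = altCore m := by
  cases m with
  | nil => rfl
  | cons h t =>
    have haru : aCore (h :: t) = PySem.List.sorted (linRuns (h :: t)) (fun x => x) false := by
      simp only [aCore]
      rw [runsA_eq]
      norm_num [addFirst_zero]
    rcases hm with hall | hne
    · have hth : ∀ x ∈ t, x = h := fun x hx => hall x (by simp [hx]) h (by simp)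
      have hc := linRuns_const t h hth
      rw [haru, hc, altCore_eval_single h t _ hc]
    · have hng : (h :: t).getLast? ≠ some h := fun e => hne (by simp [e])
      rw [haru, altCore_eval_nowrap h t hng]

-- ===== VERDICT (by name: the statement is the Claim_ definition above) =====
theorem solution_spec : Claim_equal_solution := by
  intro s _ hpre
  unfold Spec_solution solution solution_alt
  have hl : s.toList ≠ [] := by simpa using hpre
  obtain ⟨c, hc⟩ : ∃ c, s.toList.getLast? = some c := by
    cases h : s.toList.getLast? with
    | none => exact absurd (List.getLast?_eq_none_iff.mp h) hl
    | some c => exact ⟨c, rfl⟩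
  have hshape := rotA_shape s.toList [] c (by simp) (by simpa using hc)
  simp only [List.append_nil, List.length_nil] at hshape
  have h1 : aCore (rotA s.toList 0) = altCore (rotA s.toList 0) := by
    apply aCore_eq_altCore_of_shape
    rcases hshape with hall | hne
    · exact Or.inl (fun x hx y hy => by rw [hall x hx, hall y hy])
    · exact Or.inr hne
  rw [h1, altCore_rotA]
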